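-- pv_equiv track=rewrite | github.com/iHuman-Lab/ixp | ixp/participant.py | _increment_suffix
-- ===== SOURCE A (Python) =====
-- def _increment_suffix(suffix: str) -> str:
--     """Increment a letter suffix: '' -> 'a', 'a' -> 'b', 'z' -> 'aa', 'az' -> 'ba'."""
--     if not suffix:
--         return 'a'
--     chars = list(suffix)
--     for i in range(len(chars) - 1, -1, -1):
--         if chars[i] < 'z':
--             chars[i] = chr(ord(chars[i]) + 1)
--             return ''.join(chars)
--         chars[i] = 'a'
--     return 'a' + ''.join(chars)
-- ===== SOURCE B (Python) =====
-- def _increment_suffix(suffix: str) -> str: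
--     """Increment a letter suffix: '' -> 'a', 'a' -> 'b', 'z' -> 'aa', 'az' -> 'ba'."""
--     if not suffix:
--         return 'a'
--     head, last = suffix[:-1], suffix[-1]
--     if last < 'z':
--         return head + chr(ord(last) + 1)
--     return _increment_suffix(head) + 'a'
-- ===== Notes on version B (the rewrite author's own statement) =====
-- stated objective: simpler
-- what changed: A scans an index loop right-to-left over a mutable char list with an early return mid-loop; B is a short structural recursion on the string that splits off the last character, increments it if it can, and otherwise recurses on the prefix and appends 'a'.
import Mathlib
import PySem

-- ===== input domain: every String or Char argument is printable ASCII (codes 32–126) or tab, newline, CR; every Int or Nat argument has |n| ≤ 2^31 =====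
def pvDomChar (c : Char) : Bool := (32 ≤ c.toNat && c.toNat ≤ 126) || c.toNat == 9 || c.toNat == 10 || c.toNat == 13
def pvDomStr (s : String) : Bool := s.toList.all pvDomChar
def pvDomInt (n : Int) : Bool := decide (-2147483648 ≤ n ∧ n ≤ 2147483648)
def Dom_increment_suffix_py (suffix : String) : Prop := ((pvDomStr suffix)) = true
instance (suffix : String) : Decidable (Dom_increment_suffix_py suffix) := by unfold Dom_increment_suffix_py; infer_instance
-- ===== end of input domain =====

-- B replaces A's index loop over a mutable char list by a structural recursion on the
-- string (split off the last character, increment or recurse) — objective: simpler.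

-- ===== PORT A =====
-- the for-loop 'for i in range(len(chars)-1, -1, -1)' over the mutable list `chars`;
-- the Nat argument i+1 means the loop is about to look at index i
def pvAGo (chars : List Char) : Nat → List Char
  | 0 => 'a' :: chars                                   -- loop fell through: return 'a' + ''.join(chars)
  | i + 1 =>
    let c := chars.getD i 'a'                           -- chars[i]; always in range here
    if c < 'z' then chars.set i (Char.ofNat (c.toNat + 1))   -- chars[i] = chr(ord(chars[i])+1); return ''.join(chars)
    else pvAGo (chars.set i 'a') i                      -- chars[i] = 'a'; continue

def increment_suffix_py (suffix : String) : String :=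
  if suffix.toList = [] then "a"
  else String.ofList (pvAGo suffix.toList suffix.toList.length)

-- ===== PORT B =====
-- Source B's recursion splits off the LAST character (suffix[:-1], suffix[-1]); the standard
-- transcription is structural recursion on the reversed character list: head of the
-- reversed list = last character, recursive call on the tail = recursion on the prefix.
def pvBRec : List Char → List Char                      -- argument and result are reversed
  | [] => ['a']                                          -- if not suffix: return 'a'
  | c :: rest =>
    if c < 'z' then Char.ofNat (c.toNat + 1) :: rest     -- head + chr(ord(last)+1)
    else 'a' :: pvBRec rest                              -- _increment_suffix(head) + 'a'

def increment_suffix_py_alt (suffix : String) : String :=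
  String.ofList (pvBRec suffix.toList.reverse).reverse

-- ===== PRECONDITION & SPEC =====
def Spec_increment_suffix_py (suffix : String) (out : String) : Prop := out = increment_suffix_py_alt suffix
instance (suffix : String) (out : String) : Decidable (Spec_increment_suffix_py suffix out) := by unfold Spec_increment_suffix_py; infer_instance

-- ===== CLAIM (what is proved, stated in full; the proofs are below) =====
def Claim_equal_increment_suffix_py : Prop := ∀ (suffix : String), Dom_increment_suffix_py suffix → Spec_increment_suffix_py suffix (increment_suffix_py suffix)

-- ===== LEMMAS AND PROOFS =====

-- A's loop over xs++t with fuel xs.length computes B's recursion on xs (reversed), with t untouched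
lemma pvAGo_eq (xs : List Char) : ∀ t : List Char,
    pvAGo (xs ++ t) xs.length = (pvBRec xs.reverse).reverse ++ t := by
  induction xs using List.reverseRecOn with
  | nil => intro t; simp [pvAGo, pvBRec]
  | append_singleton ys c ih =>
    intro t
    have hlen : (ys ++ [c]).length = ys.length + 1 := by simp
    rw [hlen]
    have hget : ((ys ++ [c]) ++ t).getD ys.length 'a' = c := by
      simp [List.getD_eq_getElem?_getD]
    have hset : ∀ x : Char, ((ys ++ [c]) ++ t).set ys.length x = ys ++ x :: t := by
      intro x
      rw [List.append_assoc]
      simp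
    simp only [pvAGo, hget]
    by_cases hc : c < 'z'
    · rw [if_pos hc, hset]
      simp [pvBRec, hc]
    · rw [if_neg hc, hset, ih ('a' :: t)]
      simp [pvBRec, hc]

-- ===== VERDICT (by name: the statement is the Claim_ definition above) =====
theorem increment_suffix_py_spec : Claim_equal_increment_suffix_py := by
  intro suffix _
  show increment_suffix_py suffix = increment_suffix_py_alt suffix
  unfold increment_suffix_py increment_suffix_py_alt
  by_cases h : suffix.toList = []
  · rw [if_pos h, h]; rfl
  · rw [if_neg h]
    have := pvAGo_eq suffix.toList []
    simp only [List.append_nil] at this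
    rw [this]
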